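-- pv_equiv track=rewrite | github.com/asrivathsan/miniBarcoder | correction_funcs.py | find_hp
-- ===== SOURCE A (Python) =====
-- def find_hp(seq1,hplen):
-- 	counter={}
-- 	n=0
-- 	newseq=''
-- 	while n<len(seq1):
-- 		i=0
-- 		seq=seq1[n+i].replace("-","N")
-- 		curbp=seq1[n+i]
-- 		try:
-- 			while seq1[n+i+1]==seq1[n+i] or seq1[n+i+1]=="-" or seq1[n+i]=="-":
-- 				if n+i+1<len(seq1):
-- 					if seq1[n+i+1]=="-":
-- 						seq+="N"
-- 					else:
-- 						seq+=seq1[n+i+1]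
-- 					i+=1
-- 				else:
-- 					break
-- 		except IndexError:
-- 			pass
-- 		if len(seq.replace("N",""))>=int(hplen):
-- 			newseq+=seq
-- 		else:
-- 			newseq+="N"*len(seq)
-- 		n=n+i+1
-- 	return newseq
-- ===== SOURCE B (Python) =====
-- def find_hp(seq1, hplen):
--     # Pass 1: split into runs; a boundary lies between two adjacent characters
--     # only when they differ and neither is '-'.
--     runs = []
--     for c in seq1:
--         if runs and (c == "-" or runs[-1][-1] == "-" or c == runs[-1][-1]):
--             runs[-1] += c
--         else:
--             runs.append(c)
--     # Pass 2: per run, mask '-' as 'N'; keep the masked run if it has enough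
--     # non-'-'/non-'N' characters, otherwise blank the whole run with N's.
--     t = int(hplen)
--     out = []
--     for r in runs:
--         masked = r.replace("-", "N")
--         if len(masked.replace("N", "")) >= t:
--             out.append(masked)
--         else:
--             out.append("N" * len(r))
--     return "".join(out)
-- ===== Notes on version B (the rewrite author's own statement) =====
-- stated objective: alternative
-- what changed: Replaces A's interleaved nested index-crawl (outer position counter, inner try/except extension loop building the masked piece on the fly) by two separate passes: first segment the string into runs (boundary only between two differing non-'-' characters), then map each run independently to its masked or blanked form and join.
import Mathlib
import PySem

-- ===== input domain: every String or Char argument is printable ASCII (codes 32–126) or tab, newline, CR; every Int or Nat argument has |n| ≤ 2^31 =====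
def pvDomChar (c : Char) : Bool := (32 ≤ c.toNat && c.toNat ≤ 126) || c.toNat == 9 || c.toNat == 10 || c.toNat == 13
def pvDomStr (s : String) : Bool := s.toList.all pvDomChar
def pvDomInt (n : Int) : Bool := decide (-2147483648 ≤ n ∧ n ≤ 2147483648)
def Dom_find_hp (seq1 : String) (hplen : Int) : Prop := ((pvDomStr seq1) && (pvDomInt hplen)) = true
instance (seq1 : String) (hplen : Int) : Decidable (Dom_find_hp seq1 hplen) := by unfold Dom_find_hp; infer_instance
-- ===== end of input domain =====

-- B = two-pass run segmentation + per-run masking, instead of A's interleaved nested index crawl (alternative decomposition, same cost).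

-- ===== PORT A =====
-- A's inner `while` over index n+i+1; the IndexError on seq1[n+i+1] is caught and exits
-- the loop, so it corresponds to the bound check n+i+1 < length here; the Python body's
-- `if n+i+1<len(seq1)` is then always true (indexing already succeeded), its `break` is dead.
def findHpAInner (s : List Char) (n i : Nat) (seq : List Char) : List Char × Nat :=
  if h : n + i + 1 < s.length then
    if s.getD (n+i+1) ' ' == s.getD (n+i) ' ' || s.getD (n+i+1) ' ' == '-' || s.getD (n+i) ' ' == '-' then
      findHpAInner s n (i+1)
        (if s.getD (n+i+1) ' ' == '-' then seq ++ ['N'] else seq ++ [s.getD (n+i+1) ' '])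
    else (seq, i)
  else (seq, i)
termination_by s.length - (n + i)
decreasing_by omega

-- A's outer `while n < len(seq1)`: seq1[n].replace("-","N") seeds seq, the inner loop extends
-- it, then the piece (or 'N'*len) is appended and n jumps to n+i+1.  int(hplen) is the
-- identity on an Int argument; seq.replace("N","") is the filter of chars ≠ 'N'.
def findHpAOuter (s : List Char) (t : Int) (n : Nat) : List Char :=
  if h : n < s.length then
    let inner := findHpAInner s n 0 [if s.getD n ' ' == '-' then 'N' else s.getD n ' ']
    (if t ≤ ((inner.1.filter (fun c => c != 'N')).length : Int)
      then inner.1 else List.replicate inner.1.length 'N')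
    ++ findHpAOuter s t (n + inner.2 + 1)
  else []
termination_by s.length - n
decreasing_by omega

def find_hp (seq1 : String) (hplen : Int) : String :=
  String.mk (findHpAOuter seq1.toList hplen 0)

-- ===== PORT B =====
-- B's pass 1 (the for-loop growing runs[-1]): ported with the current run carried
-- reversed, c0 being its last character (Python's runs[-1][-1]).
def findHpBGo (l : List Char) (cur : List Char) (c0 : Char) : List (List Char) :=
  match l with
  | [] => [(c0 :: cur).reverse]
  | c :: rest =>
    if c == '-' || c0 == '-' || c == c0 then findHpBGo rest (c0 :: cur) c
    else (c0 :: cur).reverse :: findHpBGo rest [] c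

def findHpBRuns (s : List Char) : List (List Char) :=
  match s with
  | [] => []
  | c :: rest => findHpBGo rest [] c

-- B's pass 2 body: masked = r.replace('-','N'); keep it iff len(masked.replace('N','')) ≥ t.
def findHpBMask (t : Int) (r : List Char) : List Char :=
  let masked := r.map (fun c => if c == '-' then 'N' else c)
  if t ≤ ((masked.filter (fun c => c != 'N')).length : Int) then masked
  else List.replicate r.length 'N'

def find_hp_alt (seq1 : String) (hplen : Int) : String :=
  String.mk (((findHpBRuns seq1.toList).map (findHpBMask hplen)).flatten)

-- ===== PRECONDITION & SPEC =====
def Spec_find_hp (seq1 : String) (hplen : Int) (out : String) : Prop := out = find_hp_alt seq1 hplen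
instance (seq1 : String) (hplen : Int) (out : String) : Decidable (Spec_find_hp seq1 hplen out) := by unfold Spec_find_hp; infer_instance

-- ===== CLAIM (what is proved, stated in full; the proofs are below) =====
def Claim_equal_find_hp : Prop := ∀ (seq1 : String) (hplen : Int), Dom_find_hp seq1 hplen → Spec_find_hp seq1 hplen (find_hp seq1 hplen)

-- ===== LEMMAS AND PROOFS =====

-- Tail of the run started by c0: the consumed extension and the remainder of the list.
def runTail (c0 : Char) : List Char → List Char × List Char
  | [] => ([], [])
  | c :: rest =>
    if c == c0 || c == '-' || c0 == '-' then
      ((c :: (runTail c rest).1), (runTail c rest).2)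
    else ([], c :: rest)

def mkN (c : Char) : Char := if c == '-' then 'N' else c

theorem runTail_split (rest : List Char) : ∀ (c0 : Char),
    rest = (runTail c0 rest).1 ++ (runTail c0 rest).2 := by
  induction rest with
  | nil => intro c0; simp [runTail]
  | cons c rest ih =>
    intro c0
    by_cases hb : (c == c0 || c == '-' || c0 == '-') = true
    · simp [runTail, hb]; exact ih c
    · simp [runTail, hb]

theorem runTail_len (rest : List Char) (c0 : Char) :
    (runTail c0 rest).2.length ≤ rest.length := by
  conv_rhs => rw [runTail_split rest c0]
  simp

-- Reference segmentation; both ports are reduced to it.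
def runsSpec : List Char → List (List Char)
  | [] => []
  | c :: rest => (c :: (runTail c rest).1) :: runsSpec (runTail c rest).2
termination_by l => l.length
decreasing_by have := runTail_len rest c; simpa using Nat.lt_succ_of_le this

theorem runsSpec_nil : runsSpec [] = [] := by rw [runsSpec]

theorem inner_eq (rest : List Char) : ∀ (c0 : Char) (pre : List Char) (n i : Nat) (seq : List Char),
    pre.length = n + i →
    findHpAInner (pre ++ c0 :: rest) n i seq =
      (seq ++ (runTail c0 rest).1.map mkN, i + (runTail c0 rest).1.length) := by
  induction rest with
  | nil =>
    intro c0 pre n i seq hlen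
    rw [findHpAInner]
    simp [runTail, hlen]
  | cons c rest ih =>
    intro c0 pre n i seq hlen
    have hlt : n + i + 1 < (pre ++ c0 :: c :: rest).length := by
      simp only [List.length_append, List.length_cons]; omega
    have hget1 : (pre ++ c0 :: c :: rest).getD (n+i+1) ' ' = c := by
      have : pre ++ c0 :: c :: rest = (pre ++ [c0]) ++ c :: rest := by simp
      rw [this, List.getD_eq_getElem?_getD, List.getElem?_append_right (by simp [hlen])]
      simp [hlen]
    have hget0 : (pre ++ c0 :: c :: rest).getD (n+i) ' ' = c0 := by
      rw [List.getD_eq_getElem?_getD, List.getElem?_append_right (by omega)]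
      simp [hlen]
    rw [findHpAInner, dif_pos hlt, hget1, hget0]
    by_cases hb : (c == c0 || c == '-' || c0 == '-') = true
    · rw [if_pos hb]
      have hpre' : (pre ++ [c0]).length = n + (i + 1) := by simp [hlen]; omega
      have hre : pre ++ c0 :: c :: rest = (pre ++ [c0]) ++ c :: rest := by simp
      rw [hre] at *
      rw [ih c (pre ++ [c0]) n (i+1) _ hpre']
      have hmk : (if (c == '-') = true then seq ++ ['N'] else seq ++ [c]) = seq ++ [mkN c] := by
        by_cases hc : (c == '-') = true <;> simp [mkN, hc]
      rw [hmk]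
      simp [runTail, hb]
      omega
    · rw [if_neg hb]
      simp [runTail, hb]

theorem outer_eq (k : Nat) : ∀ (u : List Char), u.length ≤ k → ∀ (pre : List Char) (t : Int),
    findHpAOuter (pre ++ u) t pre.length = ((runsSpec u).map (findHpBMask t)).flatten := by
  induction k with
  | zero =>
    intro u hu pre t
    have : u = [] := by cases u <;> simp_all
    subst this
    rw [findHpAOuter]
    simp [runsSpec_nil]
  | succ k ih =>
    intro u hu pre t
    match u with
    | [] =>
      rw [findHpAOuter]; simp [runsSpec_nil]
    | c :: rest =>
      have hlt : pre.length < (pre ++ c :: rest).length := by simp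
      have hget : (pre ++ c :: rest).getD pre.length ' ' = c := by
        rw [List.getD_eq_getElem?_getD, List.getElem?_append_right (le_refl _)]
        simp
      rw [findHpAOuter, dif_pos hlt, hget]
      have hinner := inner_eq rest c pre pre.length 0 [if c == '-' then 'N' else c] (by omega)
      rw [hinner]
      dsimp only
      set t1 := (runTail c rest).1 with ht1
      set rem := (runTail c rest).2 with hrem
      have hsplit : rest = t1 ++ rem := runTail_split rest c
      have hre : pre ++ c :: rest = (pre ++ c :: t1) ++ rem := by
        rw [hsplit]; simp
      have hlen2 : pre.length + (0 + t1.length) + 1 = (pre ++ c :: t1).length := by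
        simp; omega
      have hrec : findHpAOuter (pre ++ c :: rest) t (pre.length + (0 + t1.length) + 1)
          = ((runsSpec rem).map (findHpBMask t)).flatten := by
        rw [hre, hlen2]
        exact ih rem (by rw [hsplit] at hu; simp at hu; omega) (pre ++ c :: t1) t
      rw [hrec]
      have hrs : runsSpec (c :: rest) = (c :: t1) :: runsSpec rem := by
        rw [runsSpec]
      rw [hrs]
      simp only [List.map_cons, List.flatten_cons]
      congr 1
      -- the piece A emits equals findHpBMask t (c :: t1)
      have hmkN : mkN = fun c => if c == '-' then 'N' else c := rfl
      simp [findHpBMask, hmkN]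

theorem bgo_eq (l : List Char) : ∀ (cur : List Char) (c0 : Char),
    findHpBGo l cur c0 =
      (cur.reverse ++ c0 :: (runTail c0 l).1) :: runsSpec (runTail c0 l).2 := by
  induction l with
  | nil => intro cur c0; simp [findHpBGo, runTail, runsSpec]
  | cons c rest ih =>
    intro cur c0
    have hcond : (c == '-' || c0 == '-' || c == c0) = (c == c0 || c == '-' || c0 == '-') := by
      by_cases h1 : (c == '-') = true <;> by_cases h2 : (c0 == '-') = true <;>
        by_cases h3 : (c == c0) = true <;> simp [h1, h2, h3]
    rw [findHpBGo, hcond]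
    by_cases hb : (c == c0 || c == '-' || c0 == '-') = true
    · rw [if_pos hb, ih (c0 :: cur) c]
      simp [runTail, hb]
    · rw [if_neg hb, ih [] c]
      simp [runTail, hb, runsSpec]

theorem bruns_eq (s : List Char) : findHpBRuns s = runsSpec s := by
  match s with
  | [] => simp [findHpBRuns, runsSpec]
  | c :: rest =>
    rw [findHpBRuns, bgo_eq rest [] c, runsSpec]
    simp

-- ===== VERDICT (by name: the statement is the Claim_ definition above) =====
theorem find_hp_spec : Claim_equal_find_hp := by
  intro seq1 hplen _
  unfold Spec_find_hp find_hp find_hp_alt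
  rw [bruns_eq]
  have := outer_eq seq1.toList.length seq1.toList (le_refl _) [] hplen
  exact congrArg String.mk (by simpa using this)
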